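-- pv_equiv track=rewrite | github.com/t-saini/HarringtonPipeline | trim_reads.py | trim_trailing_read
-- ===== SOURCE A (Python) =====
-- from typing import Tuple
--
-- def trim_trailing_read(sequence:str,qc_string:str)->Tuple[str,str]:
--     #a dictionary with all possible combinations of poor quality scoring is created
--     remove_conditions = {'FF':None,'FD':None,'DD':None,'DF':None}
--     #for each of these remove conditions we itterate through
--     #if nothing is found and the find method returns -1, we continue
--     #in the search.
--     for remove_condition in remove_conditions:
--         bad_index = qc_string.find(remove_condition)
--         if bad_index == -1:
--             continue
--         remove_conditions[remove_condition] = bad_index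
--     #once all possible combinations have been found, the minimal value will
--     #be stored in remove index, the value will always be an int, as our condition
--     #ignores None types
--     #min is being used because the lowest value will be the most upstream
--     #and according to the assignment if any dual combination is present
--     #all parts of the sequence downstream must be removed.
--     remove_index = min(value for value in remove_conditions.values() if value is not None)
--     #using the index for both the sequence and qc string indicies
--     #from the 0th index up to the removal index will be stored and returned
--     trimmed_sequence = sequence[:remove_index]
--     trimmed_qc = qc_string[:remove_index]
--     return trimmed_sequence, trimmed_qc
-- ===== SOURCE B (Python) =====
-- def trim_trailing_read(sequence: str, qc_string: str):
--     # single left-to-right pass over adjacent quality pairs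
--     for i in range(len(qc_string) - 1):
--         if qc_string[i] in 'FD' and qc_string[i + 1] in 'FD':
--             return sequence[:i], qc_string[:i]
--     raise ValueError("no low-quality pair found")
-- ===== Notes on version B (the rewrite author's own statement) =====
-- stated objective: simpler
-- what changed: Replaces the four-pattern dict of find() scans plus min() with one linear scan over adjacent quality-character pairs that returns at the first pair of characters both in {'F','D'}, raising ValueError explicitly when no such pair exists (exactly where A's min() over an empty generator raises).
import Mathlib
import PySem

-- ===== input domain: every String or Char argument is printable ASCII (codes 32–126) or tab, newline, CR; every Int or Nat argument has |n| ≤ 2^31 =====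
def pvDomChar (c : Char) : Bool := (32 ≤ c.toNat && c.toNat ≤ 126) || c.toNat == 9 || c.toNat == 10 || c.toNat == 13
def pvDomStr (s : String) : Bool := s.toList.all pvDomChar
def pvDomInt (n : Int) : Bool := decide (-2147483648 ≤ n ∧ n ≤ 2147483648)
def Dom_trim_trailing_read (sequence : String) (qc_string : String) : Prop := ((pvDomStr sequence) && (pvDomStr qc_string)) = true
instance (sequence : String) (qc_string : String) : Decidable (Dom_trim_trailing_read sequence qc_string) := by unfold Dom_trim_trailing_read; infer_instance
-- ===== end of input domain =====

-- Program B: one linear scan over adjacent quality pairs instead of A's four find() scans + min();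
-- both Pythons raise ValueError when no adjacent pair of {'F','D'} characters exists — Pre_ excludes exactly those inputs.


-- ===== PORT A =====
def trim_trailing_read (sequence : String) (qc_string : String) : String × String :=
  let remove_conditions : PySem.Dict String (Option Int) :=
    PySem.Dict.ofList [("FF", none), ("FD", none), ("DD", none), ("DF", none)]
  let remove_conditions := remove_conditions.keys.foldl (fun d remove_condition =>
      let bad_index := PySem.Str.find qc_string remove_condition
      if bad_index == -1 then d
      else d.insert remove_condition (some bad_index)) remove_conditions
  match PySem.List.min? (remove_conditions.values.filterMap (fun v => v)) (fun x => x) with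
  | none => ("", "")   -- Python raises ValueError here (min of empty generator); excluded by Pre_
  | some remove_index =>
      (PySem.Str.slice sequence none (some remove_index),
       PySem.Str.slice qc_string none (some remove_index))

-- ===== PORT B =====
def pvIsFD (c : Char) : Bool := c == 'F' || c == 'D'

-- the single pass of Source B: first index i with qc[i], qc[i+1] both in 'FD'
def pvFirstBad : List Char → Option Nat
  | a :: b :: t =>
      if pvIsFD a && pvIsFD b then some 0
      else (pvFirstBad (b :: t)).map (· + 1)
  | _ => none

def trim_trailing_read_alt (sequence : String) (qc_string : String) : String × String :=
  match pvFirstBad qc_string.toList with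
  | some i =>
      (PySem.Str.slice sequence none (some (i : Int)),
       PySem.Str.slice qc_string none (some (i : Int)))
  | none => ("", "")   -- Python raises ValueError here; excluded by Pre_

-- ===== PRECONDITION & SPEC =====
-- Pre_ excludes exactly the inputs on which Python A raises ValueError (min of an empty
-- generator): qc_string has no adjacent pair of characters both in {'F','D'}; Python B
-- raises ValueError there too.
def Pre_trim_trailing_read (_sequence : String) (qc_string : String) : Prop :=
  ∃ i < qc_string.toList.length - 1,
    pvIsFD (qc_string.toList.getD i ' ') = true ∧ pvIsFD (qc_string.toList.getD (i + 1) ' ') = true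
instance (sequence : String) (qc_string : String) : Decidable (Pre_trim_trailing_read sequence qc_string) := by
  unfold Pre_trim_trailing_read; infer_instance

def pvWitness_trim_trailing_read : String × String := ("ACGT", "!FFD")

def Spec_trim_trailing_read (sequence : String) (qc_string : String) (out : String × String) : Prop := out = trim_trailing_read_alt sequence qc_string
instance (sequence : String) (qc_string : String) (out : String × String) : Decidable (Spec_trim_trailing_read sequence qc_string out) := by unfold Spec_trim_trailing_read; infer_instance

-- ===== CLAIM (what is proved, stated in full; the proofs are below) =====
def Claim_equal_trim_trailing_read : Prop := ∀ (sequence : String) (qc_string : String), Dom_trim_trailing_read sequence qc_string → Pre_trim_trailing_read sequence qc_string → Spec_trim_trailing_read sequence qc_string (trim_trailing_read sequence qc_string)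

-- ===== LEMMAS AND PROOFS =====

-- pairAt: qc has low-quality chars at positions i and i+1
def pvPairAt (l : List Char) (i : Nat) : Prop :=
  ∃ x y, l[i]? = some x ∧ l[i+1]? = some y ∧ pvIsFD x = true ∧ pvIsFD y = true

def pvCands (q : String) : List Int :=
  [PySem.Chars.find q.toList ['F','F'], PySem.Chars.find q.toList ['F','D'],
   PySem.Chars.find q.toList ['D','D'], PySem.Chars.find q.toList ['D','F']].filter (fun v => !(v == -1))

theorem pvA_eq (s q : String) : trim_trailing_read s q =
    match PySem.List.min? (pvCands q) (fun x => x) with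
    | none => ("", "")
    | some r => (PySem.Str.slice s none (some r), PySem.Str.slice q none (some r)) := by
  by_cases h1 : PySem.Chars.find q.toList ['F','F'] = -1 <;>
  by_cases h2 : PySem.Chars.find q.toList ['F','D'] = -1 <;>
  by_cases h3 : PySem.Chars.find q.toList ['D','D'] = -1 <;>
  by_cases h4 : PySem.Chars.find q.toList ['D','F'] = -1 <;>
  simp [trim_trailing_read, pvCands, h1, h2, h3, h4, PySem.Dict.ofList, PySem.Dict.update,
    PySem.Dict.empty, PySem.Dict.keys, PySem.Dict.values, PySem.Dict.insert, PySem.Dict.contains]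

theorem pvFirstBad_pair : ∀ (l : List Char) (i : Nat), pvFirstBad l = some i → pvPairAt l i := by
  intro l
  induction l with
  | nil => intro i h; simp [pvFirstBad] at h
  | cons a l ih =>
    intro i h
    cases l with
    | nil => simp [pvFirstBad] at h
    | cons b t =>
      by_cases hab : (pvIsFD a && pvIsFD b) = true
      · simp [pvFirstBad, hab] at h
        subst h
        exact ⟨a, b, by simp, by simp, ((Bool.and_eq_true ..).mp hab).1,
          ((Bool.and_eq_true ..).mp hab).2⟩
      · simp only [pvFirstBad, hab, Bool.false_eq_true, ite_false, Option.map_eq_some_iff] at h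
        obtain ⟨i', hi', rfl⟩ := h
        obtain ⟨x, y, hx, hy, fx, fy⟩ := ih i' hi'
        exact ⟨x, y, by simpa using hx, by simpa using hy, fx, fy⟩

theorem pvFirstBad_min : ∀ (l : List Char) (i : Nat), pvFirstBad l = some i →
    ∀ j < i, ¬ pvPairAt l j := by
  intro l
  induction l with
  | nil => intro i h; simp [pvFirstBad] at h
  | cons a l ih =>
    intro i h j hj hp
    cases l with
    | nil => simp [pvFirstBad] at h
    | cons b t =>
      by_cases hab : (pvIsFD a && pvIsFD b) = true
      · simp [pvFirstBad, hab] at h; omega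
      · simp only [pvFirstBad, hab, Bool.false_eq_true, ite_false, Option.map_eq_some_iff] at h
        obtain ⟨i', hi', rfl⟩ := h
        cases j with
        | zero =>
          obtain ⟨x, y, hx, hy, fx, fy⟩ := hp
          simp at hx hy
          subst hx; subst hy
          exact hab (by simp [fx, fy])
        | succ j' =>
          obtain ⟨x, y, hx, hy, fx, fy⟩ := hp
          exact ih i' hi' j' (by omega) ⟨x, y, by simpa using hx, by simpa using hy, fx, fy⟩

theorem pvFirstBad_none : ∀ (l : List Char), pvFirstBad l = none → ∀ j, ¬ pvPairAt l j := by
  intro l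
  induction l with
  | nil => intro _ j hp; obtain ⟨x, y, hx, _⟩ := hp; simp at hx
  | cons a l ih =>
    intro h j hp
    cases l with
    | nil =>
      obtain ⟨x, y, hx, hy, _⟩ := hp
      rcases j with _ | j <;> simp at hx hy
    | cons b t =>
      by_cases hab : (pvIsFD a && pvIsFD b) = true
      · simp [pvFirstBad, hab] at h
      · simp only [pvFirstBad, hab, Bool.false_eq_true, ite_false, Option.map_eq_none_iff] at h
        cases j with
        | zero =>
          obtain ⟨x, y, hx, hy, fx, fy⟩ := hp
          simp at hx hy; subst hx; subst hy
          exact hab (by simp [fx, fy])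
        | succ j' =>
          obtain ⟨x, y, hx, hy, fx, fy⟩ := hp
          exact ih h j' ⟨x, y, by simpa using hx, by simpa using hy, fx, fy⟩

-- [x, y] is a prefix of l.drop j exactly when l has x at j and y at j+1
theorem pvPrefix_drop_iff (l : List Char) (j : Nat) (x y : Char) :
    [x, y] <+: l.drop j ↔ l[j]? = some x ∧ l[j+1]? = some y := by
  constructor
  · rintro ⟨t, ht⟩
    have h0 : (l.drop j)[0]? = some x := by rw [← ht]; rfl
    have h1 : (l.drop j)[1]? = some y := by rw [← ht]; rfl
    rw [List.getElem?_drop] at h0 h1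
    exact ⟨by simpa using h0, by simpa using h1⟩
  · rintro ⟨hx, hy⟩
    have h0 : (l.drop j)[0]? = some x := by rw [List.getElem?_drop]; simpa using hx
    have h1 : (l.drop j)[1]? = some y := by rw [List.getElem?_drop]; simpa using hy
    cases hd : l.drop j with
    | nil => rw [hd] at h0; simp at h0
    | cons u v =>
      cases v with
      | nil => rw [hd] at h1; simp at h1
      | cons w r =>
        rw [hd] at h0 h1; simp at h0 h1
        exact ⟨r, by simp [h0, h1]⟩

-- a good pair at j means find of the matching pattern is a valid index ≤ j
theorem pvFind_le (l : List Char) (j : Nat) (x y : Char) (h : [x, y] <+: l.drop j) :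
    0 ≤ PySem.Chars.find l [x, y] ∧ (PySem.Chars.find l [x, y]).toNat ≤ j := by
  have hinf : [x, y] <:+: l := h.isInfix.trans (l.drop_suffix j).isInfix
  have hnn : 0 ≤ PySem.Chars.find l [x, y] := (PySem.Chars.find_nonneg_iff l [x, y]).mpr hinf
  have hspec := PySem.Chars.find_spec hnn
  refine ⟨hnn, ?_⟩
  by_contra hgt
  exact hspec.2 j (by omega) h

theorem pvIsFD_iff (c : Char) : pvIsFD c = true ↔ c = 'F' ∨ c = 'D' := by
  simp [pvIsFD]

-- every candidate value of A marks a good pair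
theorem pvCand_pair (q : String) (v : Int) (hv : v ∈ pvCands q) :
    0 ≤ v ∧ pvPairAt q.toList v.toNat := by
  simp only [pvCands, List.mem_filter, List.mem_cons] at hv
  obtain ⟨hmem, hne⟩ := hv
  have hne' : v ≠ -1 := by simpa using hne
  have : ∃ x y, pvIsFD x = true ∧ pvIsFD y = true ∧ v = PySem.Chars.find q.toList [x, y] := by
    rcases hmem with h | h | h | h | h
    · exact ⟨'F', 'F', by decide, by decide, h⟩
    · exact ⟨'F', 'D', by decide, by decide, h⟩
    · exact ⟨'D', 'D', by decide, by decide, h⟩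
    · exact ⟨'D', 'F', by decide, by decide, h⟩
    · simp at h
  obtain ⟨x, y, fx, fy, rfl⟩ := this
  have hinf : [x, y] <:+: q.toList := (PySem.Chars.find_ne_neg_one_iff _ _).mp hne'
  have hnn : 0 ≤ PySem.Chars.find q.toList [x, y] := (PySem.Chars.find_nonneg_iff _ _).mpr hinf
  have hspec := PySem.Chars.find_spec hnn
  obtain ⟨hx, hy⟩ := (pvPrefix_drop_iff _ _ _ _).mp hspec.1
  exact ⟨hnn, x, y, hx, hy, fx, fy⟩

-- main index equality under the precondition
theorem pvMin_eq_firstBad (q : String) (i : Nat) (hfb : pvFirstBad q.toList = some i) :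
    PySem.List.min? (pvCands q) (fun x => x) = some (i : Int) := by
  obtain ⟨x, y, hx, hy, fx, fy⟩ := pvFirstBad_pair q.toList i hfb
  have hpre : [x, y] <+: q.toList.drop i := (pvPrefix_drop_iff _ _ _ _).mpr ⟨hx, hy⟩
  obtain ⟨hnn, hle⟩ := pvFind_le q.toList i x y hpre
  -- the pattern [x,y] is one of the four, so its find value is a candidate
  have hmem4 : PySem.Chars.find q.toList [x, y] ∈
      [PySem.Chars.find q.toList ['F','F'], PySem.Chars.find q.toList ['F','D'],
       PySem.Chars.find q.toList ['D','D'], PySem.Chars.find q.toList ['D','F']] := by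
    rcases (pvIsFD_iff x).mp fx with rfl | rfl <;> rcases (pvIsFD_iff y).mp fy with rfl | rfl <;> simp
  have hcand : PySem.Chars.find q.toList [x, y] ∈ pvCands q := by
    refine List.mem_filter.mpr ⟨hmem4, ?_⟩
    simp; omega
  -- find [x,y] equals i exactly
  have hfind_ge : (i : Int) ≤ PySem.Chars.find q.toList [x, y] := by
    have := pvCand_pair q _ hcand
    by_contra hlt
    rw [Int.not_le] at hlt
    exact pvFirstBad_min q.toList i hfb (PySem.Chars.find q.toList [x, y]).toNat (by omega) this.2
  have hfind_eq : PySem.Chars.find q.toList [x, y] = (i : Int) := by omega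
  -- min exists and equals i
  obtain ⟨m, hm⟩ : ∃ m, PySem.List.min? (pvCands q) (fun x => x) = some m := by
    cases hmin : PySem.List.min? (pvCands q) (fun x => x) with
    | none =>
      rw [PySem.List.min?_eq_none_iff] at hmin
      rw [hmin] at hcand
      simp at hcand
    | some m => exact ⟨m, rfl⟩
  have hmmem : m ∈ pvCands q := PySem.List.min?_mem hm
  have hmin_le : m ≤ PySem.Chars.find q.toList [x, y] := PySem.List.min?_isMin hm _ hcand
  have hi_le : (i : Int) ≤ m := by
    obtain ⟨hmn, hpm⟩ := pvCand_pair q m hmmem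
    by_contra hlt
    rw [Int.not_le] at hlt
    exact pvFirstBad_min q.toList i hfb m.toNat (by omega) hpm
  rw [hm]
  congr 1
  omega

theorem pvPre_firstBad (q : String) (hpre : ∃ i < q.toList.length - 1,
    pvIsFD (q.toList.getD i ' ') = true ∧ pvIsFD (q.toList.getD (i + 1) ' ') = true) :
    ∃ i, pvFirstBad q.toList = some i := by
  obtain ⟨j, hj, f1, f2⟩ := hpre
  cases hfb : pvFirstBad q.toList with
  | some i => exact ⟨i, rfl⟩
  | none =>
    exfalso
    have hlen : j + 1 < q.toList.length := by omega
    have hx : q.toList[j]? = some (q.toList.getD j ' ') := by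
      rw [List.getD_eq_getElem?_getD, List.getElem?_eq_getElem (by omega)]; rfl
    have hy : q.toList[j+1]? = some (q.toList.getD (j+1) ' ') := by
      rw [List.getD_eq_getElem?_getD, List.getElem?_eq_getElem hlen]; rfl
    exact pvFirstBad_none q.toList hfb j ⟨_, _, hx, hy, f1, f2⟩

theorem trim_trailing_read_witness_ok :
    Dom_trim_trailing_read pvWitness_trim_trailing_read.1 pvWitness_trim_trailing_read.2 ∧
    Pre_trim_trailing_read pvWitness_trim_trailing_read.1 pvWitness_trim_trailing_read.2 := by
  constructor <;> decide

-- ===== VERDICT (by name: the statement is the Claim_ definition above) =====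
theorem trim_trailing_read_spec : Claim_equal_trim_trailing_read := by
  intro s q _ hpre
  unfold Spec_trim_trailing_read
  obtain ⟨i, hfb⟩ := pvPre_firstBad q hpre
  rw [pvA_eq, pvMin_eq_firstBad q i hfb]
  simp [trim_trailing_read_alt, hfb]
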